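-- pv_equiv track=rewrite | github.com/nikhilxbhargava/catanEngine | catan/actions.py | _discard_combinations
-- ===== SOURCE A (Python) =====
-- def _discard_combinations(resources: list[int], amount: int) -> list[list[int]]:
--     """Generate all ways to discard exactly `amount` cards from `resources`.
--
--     Each result is a freqdeck of cards to discard.
--     """
--     results: list[list[int]] = []
--     current = [0] * 5
--
--     def backtrack(idx: int, remaining: int) -> None:
--         if remaining == 0:
--             results.append(current.copy())
--             return
--         if idx >= 5:
--             return
--         max_from_this = min(resources[idx], remaining)
--         for take in range(max_from_this + 1):
--             current[idx] = take
--             backtrack(idx + 1, remaining - take)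
--         current[idx] = 0
--
--     backtrack(0, amount)
--     return results
-- ===== SOURCE B (Python) =====
-- def _discard_combinations(resources: list[int], amount: int) -> list[list[int]]:
--     """Generate all ways to discard exactly `amount` cards from `resources`.
--
--     Iterative level-by-level frontier expansion: a frontier of (prefix, remaining)
--     states is expanded once per resource slot; finished states (remaining == 0)
--     are carried forward padded with a 0, and the answers are read off the final
--     frontier.  No recursion, no shared mutable current.
--     """
--     states: list[tuple[list[int], int]] = [([], amount)]
--     for idx in range(5):
--         new_states: list[tuple[list[int], int]] = []
--         for prefix, rem in states:
--             if rem == 0: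
--                 new_states.append((prefix + [0], 0))
--             else:
--                 cap = min(resources[idx], rem)
--                 for take in range(cap + 1):
--                     new_states.append((prefix + [take], rem - take))
--         states = new_states
--     return [prefix for prefix, rem in states if rem == 0]
-- ===== Notes on version B (the rewrite author's own statement) =====
-- stated objective: alternative
-- what changed: Replaces the recursive DFS backtracker that threads a shared mutable `current` and restores it after each loop by an iterative level-by-level frontier expansion: a list of (prefix, remaining) states is expanded once per resource slot (finished states carried forward padded with 0) and the answers are read off the final frontier.
import Mathlib
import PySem

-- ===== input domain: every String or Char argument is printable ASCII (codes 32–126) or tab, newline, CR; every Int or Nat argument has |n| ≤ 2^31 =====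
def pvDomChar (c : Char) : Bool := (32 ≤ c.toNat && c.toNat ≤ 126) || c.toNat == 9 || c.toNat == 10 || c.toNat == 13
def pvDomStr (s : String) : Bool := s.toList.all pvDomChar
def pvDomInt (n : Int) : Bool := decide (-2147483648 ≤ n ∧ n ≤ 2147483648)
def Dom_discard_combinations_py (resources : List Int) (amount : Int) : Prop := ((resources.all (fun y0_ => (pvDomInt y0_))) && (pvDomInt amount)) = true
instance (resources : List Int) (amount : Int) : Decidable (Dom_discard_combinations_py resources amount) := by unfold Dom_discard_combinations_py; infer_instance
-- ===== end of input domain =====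

-- B replaces A's recursive DFS backtracker (shared mutable `current`, restored after each
-- loop) by an iterative level-by-level frontier expansion of (prefix, remaining) states.
-- (A mutates no argument; the equivalence is about the return value.)


-- ===== PORT A =====
-- Python's nested `backtrack` mutates `results`/`current` in place; the port threads the
-- pair (results, current) through the recursion and the `for take in range(...)` fold.
-- `fuel` only makes the idx-increasing recursion structural (initial fuel 5 is never
-- exhausted before the `idx >= 5` guard fires); resources[idx] is ported as pyGetD
-- (exact on Pre_, where every read index is < len(resources)).
def pvBacktrack (resources : List Int) :
    Nat → Nat → Int → List (List Int) × List Int → List (List Int) × List Int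
  | fuel, idx, remaining, st =>
    if remaining = 0 then (st.1 ++ [st.2], st.2)
    else if 5 ≤ idx then st
    else
      match fuel with
      | 0 => st  -- unreachable from the initial call (fuel = 5 ≥ 5 - idx)
      | fuel' + 1 =>
        ((((PySem.List.pyRange 0 (min (PySem.List.pyGetD resources (idx : Int) 0) remaining + 1) 1).foldl
            (fun s take => pvBacktrack resources fuel' (idx + 1) (remaining - take) (s.1, s.2.set idx take))
            st).1),
         (((PySem.List.pyRange 0 (min (PySem.List.pyGetD resources (idx : Int) 0) remaining + 1) 1).foldl
            (fun s take => pvBacktrack resources fuel' (idx + 1) (remaining - take) (s.1, s.2.set idx take))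
            st).2.set idx 0))

def discard_combinations_py (resources : List Int) (amount : Int) : List (List Int) :=
  (pvBacktrack resources 5 0 amount ([], [0, 0, 0, 0, 0])).1

-- ===== PORT B =====
-- Source B's `for idx in range(5)` over a frontier of (prefix, remaining) states becomes a
-- foldl over pyRange 0 5 1; the inner per-state appends become a flatMap; the final
-- comprehension is filter + map; resources[idx] is pyGetD (exact on Pre_).
def discard_combinations_py_alt (resources : List Int) (amount : Int) : List (List Int) :=
  ((((PySem.List.pyRange 0 5 1).foldl
      (fun states idx =>
        states.flatMap (fun s =>
          if s.2 = 0 then [(s.1 ++ [0], (0 : Int))]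
          else (PySem.List.pyRange 0 (min (PySem.List.pyGetD resources idx 0) s.2 + 1) 1).map
            (fun take => (s.1 ++ [take], s.2 - take))))
      [(([] : List Int), amount)]).filter (fun s => s.2 = 0)).map (fun s => s.1))

-- ===== PRECONDITION & SPEC =====
-- Pre_ excludes exactly the inputs where A raises IndexError (and B raises it at the same
-- read): resource lists shorter than 5 when a positive amount survives every listed
-- nonnegative count (the all-zero take path reads resources[len]), and the empty list with
-- amount ≠ 0 (the very first read fails).
def Pre_discard_combinations_py (resources : List Int) (amount : Int) : Prop :=
  5 ≤ resources.length ∨ amount = 0 ∨ (amount < 0 ∧ resources ≠ []) ∨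
    (0 < amount ∧ ∃ r ∈ resources, r < 0)
instance (resources : List Int) (amount : Int) : Decidable (Pre_discard_combinations_py resources amount) := by unfold Pre_discard_combinations_py; infer_instance
def pvWitness_discard_combinations_py : List Int × Int := ([1, 1, 1, 1, 1], 2)

def Spec_discard_combinations_py (resources : List Int) (amount : Int) (out : List (List Int)) : Prop := out = discard_combinations_py_alt resources amount
instance (resources : List Int) (amount : Int) (out : List (List Int)) : Decidable (Spec_discard_combinations_py resources amount out) := by unfold Spec_discard_combinations_py; infer_instance

-- ===== CLAIM (what is proved, stated in full; the proofs are below) =====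
def Claim_equal_discard_combinations_py : Prop := ∀ (resources : List Int) (amount : Int), Dom_discard_combinations_py resources amount → Pre_discard_combinations_py resources amount → Spec_discard_combinations_py resources amount (discard_combinations_py resources amount)

-- ===== LEMMAS AND PROOFS =====

-- Common functional reading: the list of (5 - idx)-long completions (padded with zeros)
-- of a partial discard with `rem` still to take.
def pvT (resources : List Int) : Nat → Int → List (List Int)
  | idx, rem =>
    if rem = 0 then [List.replicate (5 - idx) 0]
    else if _h5 : 5 ≤ idx then []
    else
      (PySem.List.pyRange 0 (min (PySem.List.pyGetD resources (idx : Int) 0) rem + 1) 1).flatMap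
        (fun t => (pvT resources (idx + 1) (rem - t)).map (fun u => t :: u))
termination_by idx => 5 - idx
decreasing_by omega

-- Functional reading of A's backtracker with explicit current
def pvG (resources : List Int) (idx : Nat) (rem : Int) (cur : List Int) : List (List Int) :=
  if rem = 0 then [cur]
  else if _h5 : 5 ≤ idx then []
  else
    (PySem.List.pyRange 0 (min (PySem.List.pyGetD resources (idx : Int) 0) rem + 1) 1).flatMap
      (fun t => pvG resources (idx + 1) (rem - t) (cur.set idx t))
termination_by 5 - idx
decreasing_by omega

-- one frontier-expansion step of B, and B's remaining work from level idx on
def pvExpand (resources : List Int) (idx : Nat) (S : List (List Int × Int)) :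
    List (List Int × Int) :=
  S.flatMap (fun s =>
    if s.2 = 0 then [(s.1 ++ [0], (0 : Int))]
    else (PySem.List.pyRange 0 (min (PySem.List.pyGetD resources (idx : Int) 0) s.2 + 1) 1).map
      (fun take => (s.1 ++ [take], s.2 - take)))

def pvFin (resources : List Int) (idx : Nat) (S : List (List Int × Int)) : List (List Int) :=
  S.flatMap (fun s => (pvT resources idx s.2).map (fun u => s.1 ++ u))

lemma pvSetZero : ∀ (l : List Int) (i : Nat), l.getD i 0 = 0 → l.set i 0 = l := by
  intro l
  induction l with
  | nil => intro i _; rfl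
  | cons x xs ih =>
    intro i h
    cases i with
    | zero => rw [List.getD_cons_zero] at h; simp [h]
    | succ n => rw [List.getD_cons_succ] at h; simp [ih n h]

lemma pvGetDSetNe (l : List Int) (i j : Nat) (a : Int) (h : i ≠ j) :
    (l.set i a).getD j 0 = l.getD j 0 := by
  simp [List.getD, List.getElem?_set_ne h]

lemma pvZeros : ∀ j : Nat, ([0, 0, 0, 0, 0] : List Int).getD j 0 = 0
  | 0 => rfl
  | 1 => rfl
  | 2 => rfl
  | 3 => rfl
  | 4 => rfl
  | (_ + 5) => rfl

-- A's backtracker computes pvG and restores `current`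
lemma pvBt_eq (resources : List Int) :
    ∀ (fuel idx : Nat), 5 - idx ≤ fuel →
    ∀ (rem : Int) (cur : List Int) (rs : List (List Int)),
      (∀ j, idx ≤ j → cur.getD j 0 = 0) →
      pvBacktrack resources fuel idx rem (rs, cur) = (rs ++ pvG resources idx rem cur, cur) := by
  intro fuel
  induction fuel with
  | zero =>
    intro idx h rem cur rs hz
    have h5 : 5 ≤ idx := by omega
    rw [pvBacktrack, pvG]
    by_cases hrem : rem = 0 <;> simp [hrem, h5]
  | succ n ih =>
    intro idx h rem cur rs hz
    by_cases h5 : 5 ≤ idx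
    · rw [pvBacktrack, pvG]
      by_cases hrem : rem = 0 <;> simp [hrem, h5]
    · rw [pvBacktrack, pvG]
      by_cases hrem : rem = 0
      · simp [hrem]
      · simp only [if_neg hrem, if_neg h5, dif_neg h5]
        have key : ∀ (ts : List Int) (rs' : List (List Int)) (s0 : Int),
            ∃ s1, ts.foldl
                (fun s take =>
                  pvBacktrack resources n (idx + 1) (rem - take) (s.1, s.2.set idx take))
                (rs', cur.set idx s0)
              = (rs' ++ ts.flatMap (fun t => pvG resources (idx + 1) (rem - t) (cur.set idx t)),
                 cur.set idx s1) := by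
          intro ts
          induction ts with
          | nil => intro rs' s0; exact ⟨s0, by simp⟩
          | cons t ts iht =>
            intro rs' s0
            simp only [List.foldl_cons, List.set_set]
            rw [ih (idx + 1) (by omega) (rem - t) (cur.set idx t) rs'
              (fun j hj => by
                rw [pvGetDSetNe _ _ _ _ (by omega)]; exact hz j (by omega))]
            obtain ⟨s1, hs⟩ :=
              iht (rs' ++ pvG resources (idx + 1) (rem - t) (cur.set idx t)) t
            exact ⟨s1, by rw [hs]; simp [List.append_assoc]⟩
        obtain ⟨s1, hs⟩ := key
          (PySem.List.pyRange 0 (min (PySem.List.pyGetD resources (idx : Int) 0) rem + 1) 1)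
          rs 0
        rw [pvSetZero cur idx (hz idx (le_refl idx))] at hs
        rw [hs, List.set_set, pvSetZero cur idx (hz idx (le_refl idx))]

-- a current whose entries from idx on are zero is its prefix padded with zeros
lemma pvPad (cur : List Int) (idx : Nat) (hlen : cur.length = 5)
    (hz : ∀ j, idx ≤ j → cur.getD j 0 = 0) :
    cur = cur.take idx ++ List.replicate (5 - idx) 0 := by
  refine List.ext_getElem (by simp [hlen]; omega) ?_
  intro i hi hi'
  by_cases hlt : i < idx
  · rw [List.getElem_append_left (by simp [hlen]; omega)]
    simp [List.getElem_take]
  · have hz' := hz i (by omega)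
    rw [List.getD_eq_getElem _ _ hi] at hz'
    rw [List.getElem_append_right (by simp [hlen]; omega)]
    simp [hz']

-- pvG is pvT with the fixed prefix glued on
lemma pvG_eq_pvT (resources : List Int) :
    ∀ (fuel idx : Nat), 5 - idx ≤ fuel →
    ∀ (rem : Int) (cur : List Int), cur.length = 5 →
      (∀ j, idx ≤ j → cur.getD j 0 = 0) →
      pvG resources idx rem cur = (pvT resources idx rem).map (fun u => cur.take idx ++ u) := by
  intro fuel
  induction fuel with
  | zero =>
    intro idx h rem cur hlen hz
    have h5 : 5 ≤ idx := by omega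
    rw [pvG, pvT]
    by_cases hrem : rem = 0
    · simp only [if_pos hrem, List.map_cons, List.map_nil]
      rw [← pvPad cur idx hlen hz]
    · simp [hrem, h5]
  | succ n ih =>
    intro idx h rem cur hlen hz
    rw [pvG, pvT]
    by_cases hrem : rem = 0
    · simp only [if_pos hrem, List.map_cons, List.map_nil]
      rw [← pvPad cur idx hlen hz]
    · by_cases h5 : 5 ≤ idx
      · simp [hrem, h5]
      · simp only [if_neg hrem, dif_neg h5]
        rw [List.map_flatMap]
        refine List.flatMap_congr ?_
        intro t _
        rw [ih (idx + 1) (by omega) (rem - t) (cur.set idx t) (by simp [hlen])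
          (fun j hj => by rw [pvGetDSetNe _ _ _ _ (by omega)]; exact hz j (by omega))]
        rw [List.map_map]
        refine List.map_congr_left fun u _ => ?_
        have htake : (cur.set idx t).take (idx + 1) = cur.take idx ++ [t] := by
          refine List.ext_getElem (by simp [hlen]; omega) ?_
          intro i hi hi'
          by_cases hlt : i < idx
          · rw [List.getElem_take, List.getElem_set_ne (by omega),
              List.getElem_append_left (by simp [hlen]; omega)]
            simp [List.getElem_take]
          · have hieq : i = idx := by
              simp only [List.length_take, List.length_set, hlen] at hi
              omega
            subst hieq
            rw [List.getElem_take, List.getElem_set_self (by simp [hlen]; omega),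
              List.getElem_append_right (by simp)]
            simp [hlen, Nat.min_eq_left (by omega : i ≤ 5)]
        simp [htake]

lemma pvA_eq (resources : List Int) (amount : Int) :
    discard_combinations_py resources amount = pvT resources 0 amount := by
  unfold discard_combinations_py
  rw [pvBt_eq resources 5 0 (by omega) amount _ [] (fun j _ => pvZeros j)]
  simp only [List.nil_append]
  rw [pvG_eq_pvT resources 5 0 (by omega) amount [0, 0, 0, 0, 0] rfl (fun j _ => pvZeros j)]
  simp

-- closing the frontier at level 5: keep the states with remainder 0
lemma pvFin5 (resources : List Int) (S : List (List Int × Int)) :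
    (S.filter (fun s => s.2 = 0)).map (fun s => s.1) = pvFin resources 5 S := by
  induction S with
  | nil => rfl
  | cons s S ih =>
    unfold pvFin at *
    by_cases hs : s.2 = 0
    · rw [List.flatMap_cons, pvT, if_pos hs]
      simp [hs, ih]
    · rw [List.flatMap_cons, pvT, if_neg hs]
      simp [hs, ih]

-- one expansion step preserves the final answer
lemma pvStep (resources : List Int) (idx : Nat) (h5 : idx < 5) (S : List (List Int × Int)) :
    pvFin resources (idx + 1) (pvExpand resources idx S) = pvFin resources idx S := by
  induction S with
  | nil => rfl
  | cons s S ih =>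
    unfold pvExpand at *
    rw [List.flatMap_cons]
    unfold pvFin at *
    rw [List.flatMap_append, ih, List.flatMap_cons]
    congr 1
    by_cases hs : s.2 = 0
    · rw [if_pos hs, List.flatMap_cons, List.flatMap_nil, List.append_nil]
      rw [pvT, if_pos rfl]
      conv_rhs => rw [hs, pvT, if_pos rfl]
      have hrep : List.replicate (5 - idx) (0 : Int) = 0 :: List.replicate (5 - (idx + 1)) 0 := by
        rw [show 5 - idx = (5 - (idx + 1)) + 1 by omega, List.replicate_succ]
      simp [hrep]
    · rw [if_neg hs]
      rw [List.flatMap_map]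
      conv_rhs => rw [pvT, if_neg hs, dif_neg (by omega : ¬ 5 ≤ idx)]
      rw [List.map_flatMap]
      refine List.flatMap_congr fun t _ => ?_
      simp [Function.comp, List.append_assoc]

lemma pvAlt_eq (resources : List Int) (amount : Int) :
    discard_combinations_py_alt resources amount = pvT resources 0 amount := by
  unfold discard_combinations_py_alt
  rw [show PySem.List.pyRange 0 5 1 = [0, 1, 2, 3, 4] from by decide]
  simp only [List.foldl_cons, List.foldl_nil]
  rw [show ∀ S : List (List Int × Int), S.flatMap (fun s =>
      if s.2 = 0 then [(s.1 ++ [0], (0 : Int))]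
      else (PySem.List.pyRange 0 (min (PySem.List.pyGetD resources 0 0) s.2 + 1) 1).map
        (fun take => (s.1 ++ [take], s.2 - take))) = pvExpand resources 0 S from fun _ => rfl]
  rw [show ∀ S : List (List Int × Int), S.flatMap (fun s =>
      if s.2 = 0 then [(s.1 ++ [0], (0 : Int))]
      else (PySem.List.pyRange 0 (min (PySem.List.pyGetD resources 1 0) s.2 + 1) 1).map
        (fun take => (s.1 ++ [take], s.2 - take))) = pvExpand resources 1 S from fun _ => rfl]
  rw [show ∀ S : List (List Int × Int), S.flatMap (fun s =>
      if s.2 = 0 then [(s.1 ++ [0], (0 : Int))]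
      else (PySem.List.pyRange 0 (min (PySem.List.pyGetD resources 2 0) s.2 + 1) 1).map
        (fun take => (s.1 ++ [take], s.2 - take))) = pvExpand resources 2 S from fun _ => rfl]
  rw [show ∀ S : List (List Int × Int), S.flatMap (fun s =>
      if s.2 = 0 then [(s.1 ++ [0], (0 : Int))]
      else (PySem.List.pyRange 0 (min (PySem.List.pyGetD resources 3 0) s.2 + 1) 1).map
        (fun take => (s.1 ++ [take], s.2 - take))) = pvExpand resources 3 S from fun _ => rfl]
  rw [show ∀ S : List (List Int × Int), S.flatMap (fun s =>
      if s.2 = 0 then [(s.1 ++ [0], (0 : Int))]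
      else (PySem.List.pyRange 0 (min (PySem.List.pyGetD resources 4 0) s.2 + 1) 1).map
        (fun take => (s.1 ++ [take], s.2 - take))) = pvExpand resources 4 S from fun _ => rfl]
  rw [pvFin5]
  rw [show (5 : Nat) = 4 + 1 from rfl, pvStep resources 4 (by omega)]
  rw [show (4 : Nat) = 3 + 1 from rfl, pvStep resources 3 (by omega)]
  rw [show (3 : Nat) = 2 + 1 from rfl, pvStep resources 2 (by omega)]
  rw [show (2 : Nat) = 1 + 1 from rfl, pvStep resources 1 (by omega)]
  rw [show (1 : Nat) = 0 + 1 from rfl, pvStep resources 0 (by omega)]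
  unfold pvFin
  simp

-- ===== VERDICT (by name: the statement is the Claim_ definition above) =====
theorem discard_combinations_py_spec : Claim_equal_discard_combinations_py := by
  intro resources amount _ _
  unfold Spec_discard_combinations_py
  rw [pvA_eq, pvAlt_eq]
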